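-- pv_equiv track=rewrite | github.com/daniel-reich/turbo-robot | vnzjuqjCf4MFHGLJp_3.py | shift_letters
-- ===== SOURCE A (Python) =====
-- def shift_letters(txt, n):
--     location = [i for i in range(len(txt)) if txt[i] == " "]
--     new_txt = txt.replace(" ", "", txt.count(" "))
--     n = n % len(new_txt)
--     final_txt = new_txt[-n:] + new_txt[:-n]
--     for i in location:
--         final_txt = final_txt[:i] + " " +final_txt[i:]
--     return final_txt
-- ===== SOURCE B (Python) =====
-- def shift_letters(txt, n):
--     chars = [c for c in txt if c != ' ']
--     m = len(chars)
--     k = (m - n % m) % m          # split point of the right-rotation; raises ZeroDivisionError like A when no non-space char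
--     rotated = chars[k:] + chars[:k]
--     out = []
--     j = 0
--     for c in txt:
--         if c == ' ':
--             out.append(' ')
--         else:
--             out.append(rotated[j])
--             j += 1
--     return ''.join(out)
-- ===== Notes on version B (the rewrite author's own statement) =====
-- stated objective: simpler
-- what changed: B replaces A's space-index list plus repeated slice-and-insert loop with one forward pass over txt that keeps spaces and consumes the rotated non-space characters in order.
import Mathlib
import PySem

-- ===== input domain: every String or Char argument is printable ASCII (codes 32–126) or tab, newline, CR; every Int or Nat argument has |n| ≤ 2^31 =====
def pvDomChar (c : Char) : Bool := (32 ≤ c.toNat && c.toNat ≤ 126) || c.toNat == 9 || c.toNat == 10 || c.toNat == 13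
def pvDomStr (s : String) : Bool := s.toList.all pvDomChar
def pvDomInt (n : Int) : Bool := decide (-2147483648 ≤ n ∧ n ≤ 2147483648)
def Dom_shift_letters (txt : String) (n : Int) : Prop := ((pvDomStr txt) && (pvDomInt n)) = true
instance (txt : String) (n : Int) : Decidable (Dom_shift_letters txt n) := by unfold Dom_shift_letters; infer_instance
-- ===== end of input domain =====

-- B rebuilds the string in one forward pass consuming the rotated characters in order,
-- instead of A's space-index list plus repeated slice-and-insert loop (objective: simpler).

-- ===== PORT A =====
def shift_letters (txt : String) (n : Int) : String :=
  let s := txt.toList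
  -- location = [i for i in range(len(txt)) if txt[i] == " "]
  let location := (PySem.List.pyRange 0 (s.length : Int)).filter
    (fun i => PySem.List.pyGet? s i == some ' ')
  -- new_txt = txt.replace(" ", "", txt.count(" ")): the count is the total number of
  -- occurrences of " ", so this is exactly replace-all (PySem.Chars.replace).
  let new_txt := PySem.Chars.replace s [' '] []
  -- n = n % len(new_txt): Python raises ZeroDivisionError when new_txt is empty -- excluded by Pre_.
  let m : Int := PySem.Int.mod n (new_txt.length : Int)
  -- final_txt = new_txt[-n:] + new_txt[:-n]
  let final := PySem.List.slice new_txt (some (-m)) none ++ PySem.List.slice new_txt none (some (-m))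
  -- for i in location: final_txt = final_txt[:i] + " " + final_txt[i:]
  let final2 := location.foldl
    (fun f i => PySem.List.slice f none (some i) ++ [' '] ++ PySem.List.slice f (some i) none) final
  String.ofList final2

-- ===== PORT B =====
-- the single forward pass of Source B: ' ' stays; any other char takes the next rotated char
def pvMerge : List Char → List Char → List Char
  | [], _ => []
  | c :: t, r =>
    if c = ' ' then ' ' :: pvMerge t r
    else
      match r with
      | [] => []            -- rotated[j] out of range: unreachable, rotated has one char per non-space char
      | a :: r' => a :: pvMerge t r'

def shift_letters_alt (txt : String) (n : Int) : String :=
  let chars := txt.toList.filter (fun c => decide (c ≠ ' '))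
  let m : Int := (chars.length : Int)
  -- k = (m - n % m) % m  (raises ZeroDivisionError like A when there is no non-space char -- excluded by Pre_)
  let k : Nat := (PySem.Int.mod (m - PySem.Int.mod n m) m).toNat
  -- rotated = chars[k:] + chars[:k]  (0 ≤ k, so the slices are drop/take)
  let rotated := chars.drop k ++ chars.take k
  String.ofList (pvMerge txt.toList rotated)

-- ===== PRECONDITION & SPEC =====
-- Pre_ excludes exactly the inputs where txt has no non-space character: there both A and B
-- raise ZeroDivisionError on `n % 0`.
def Pre_shift_letters (txt : String) (n : Int) : Prop :=
  txt.toList.any (fun c => decide (c ≠ ' ')) = true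
instance (txt : String) (n : Int) : Decidable (Pre_shift_letters txt n) := by
  unfold Pre_shift_letters; infer_instance
def pvWitness_shift_letters : String × Int := ("ab c", 1)

def Spec_shift_letters (txt : String) (n : Int) (out : String) : Prop := out = shift_letters_alt txt n
instance (txt : String) (n : Int) (out : String) : Decidable (Spec_shift_letters txt n out) := by unfold Spec_shift_letters; infer_instance

-- ===== CLAIM (what is proved, stated in full; the proofs are below) =====
def Claim_equal_shift_letters : Prop := ∀ (txt : String) (n : Int), Dom_shift_letters txt n → Pre_shift_letters txt n → Spec_shift_letters txt n (shift_letters txt n)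

-- ===== LEMMAS AND PROOFS =====

-- replace(" ", "", all) removes exactly the spaces
theorem pv_go_space (fuel : Nat) : ∀ (l acc : List Char), l.length ≤ fuel →
    PySem.Chars.replace.go [' '] [] fuel l acc = acc.reverse ++ l.filter (fun c => decide (c ≠ ' ')) := by
  induction fuel with
  | zero =>
    intro l acc h
    have : l = [] := List.eq_nil_of_length_eq_zero (Nat.le_zero.mp h)
    subst this; simp [PySem.Chars.replace.go]
  | succ f ih =>
    intro l acc h
    cases l with
    | nil => simp [PySem.Chars.replace.go]
    | cons c t =>
      by_cases hc : c = ' '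
      · subst hc
        have hpre : List.isPrefixOf [' '] (' ' :: t) = true := by
          simp [List.isPrefixOf]
        simp only [PySem.Chars.replace.go, hpre, if_pos]
        rw [ih _ _ (by simpa using Nat.le_of_succ_le_succ h)]
        simp
      · have hpre : List.isPrefixOf [' '] (c :: t) = false := by
          simp [List.isPrefixOf]; exact fun h' => hc h'.symm
        simp only [PySem.Chars.replace.go, hpre]
        rw [if_neg (by simp)]
        rw [ih _ _ (by simpa using Nat.le_of_succ_le_succ h)]
        simp [hc]

theorem pv_replace_space (s : List Char) :
    PySem.Chars.replace s [' '] [] = s.filter (fun c => decide (c ≠ ' ')) := by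
  have h : ¬ (List.isEmpty ([' '] : List Char) = true) := by simp
  rw [PySem.Chars.replace, if_neg h, pv_go_space s.length s [] le_rfl]
  simp

-- inserting at shifted positions commutes with a fixed head
theorem pv_fold_succ (is : List Nat) : ∀ (a : Char) (s : List Char),
    (is.map Nat.succ).foldl (fun f i => f.take i ++ ' ' :: f.drop i) (a :: s)
      = a :: is.foldl (fun f i => f.take i ++ ' ' :: f.drop i) s := by
  induction is with
  | nil => intro a s; simp
  | cons i is ih =>
    intro a s
    simp only [List.map_cons, List.foldl_cons, List.take_succ_cons, List.drop_succ_cons]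
    exact ih a _

-- A's insertion fold over the space positions equals B's single merge pass
theorem pv_fold_eq_merge : ∀ (L r : List Char),
    r.length = (L.filter (fun c => decide (c ≠ ' '))).length →
    ((List.range L.length).filter (fun i => L[i]? == some ' ')).foldl
        (fun f i => f.take i ++ ' ' :: f.drop i) r
      = pvMerge L r := by
  intro L
  induction L with
  | nil =>
    intro r hr
    simp at hr
    subst hr; simp [pvMerge]
  | cons c t ih =>
    intro r hr
    have hrange : List.range (c :: t).length = 0 :: (List.range t.length).map Nat.succ := by
      simp [List.range_succ_eq_map]
    by_cases hc : c = ' '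
    · subst hc
      rw [hrange]
      have hfil : (0 :: (List.range t.length).map Nat.succ).filter (fun i => (' ' :: t)[i]? == some ' ')
          = 0 :: ((List.range t.length).filter (fun i => t[i]? == some ' ')).map Nat.succ := by
        simp [List.filter_map, Function.comp_def]
      rw [hfil]
      simp only [List.foldl_cons, List.take_zero, List.drop_zero, List.nil_append]
      rw [pv_fold_succ]
      rw [ih r (by simpa using hr)]
      simp [pvMerge]
    · rw [hrange]
      have hfil : (0 :: (List.range t.length).map Nat.succ).filter (fun i => (c :: t)[i]? == some ' ')
          = ((List.range t.length).filter (fun i => t[i]? == some ' ')).map Nat.succ := by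
        simp [hc, List.filter_map, Function.comp_def]
      rw [hfil]
      have hr' : ∃ a r', r = a :: r' := by
        cases r with
        | nil => simp [hc] at hr
        | cons a r' => exact ⟨a, r', rfl⟩
      obtain ⟨a, r', rfl⟩ := hr'
      rw [pv_fold_succ]
      rw [ih r' (by simpa [List.filter_cons, hc] using hr)]
      simp [pvMerge, hc]

-- ===== VERDICT (by name: the statement is the Claim_ definition above) =====
theorem shift_letters_spec : Claim_equal_shift_letters := by
  intro txt n _hdom hpre
  unfold Spec_shift_letters shift_letters shift_letters_alt
  dsimp only
  set L := txt.toList with hL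
  set F := L.filter (fun c => decide (c ≠ ' ')) with hF
  have hFne : F ≠ [] := by
    unfold Pre_shift_letters at hpre
    rw [List.any_eq_true] at hpre
    obtain ⟨c, hc, hcne⟩ := hpre
    intro h
    have : c ∈ F := by rw [hF]; exact List.mem_filter.mpr ⟨hc, hcne⟩
    simp [h] at this
  have hm0 : 0 < F.length := List.length_pos_iff.mpr hFne
  have hmI : (0 : Int) < (F.length : Int) := by exact_mod_cast hm0
  have hmod0 : 0 ≤ PySem.Int.mod n (F.length : Int) := PySem.Int.mod_nonneg n hmI
  have hmod1 : PySem.Int.mod n (F.length : Int) < (F.length : Int) := PySem.Int.mod_lt n hmI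
  set q : Int := PySem.Int.mod n (F.length : Int) with hq
  have hrot :
      PySem.List.slice F (some (-q)) none ++ PySem.List.slice F none (some (-q))
        = F.drop ((PySem.Int.mod ((F.length : Int) - q) (F.length : Int)).toNat)
          ++ F.take ((PySem.Int.mod ((F.length : Int) - q) (F.length : Int)).toNat) := by
    by_cases h0 : q = 0
    · rw [h0]
      have hz : PySem.Int.mod ((F.length : Int) - 0) (F.length : Int) = 0 := by
        rw [sub_zero]
        exact (PySem.Int.mod_eq_zero_iff_dvd (F.length : Int) (F.length : Int)).mpr ⟨1, by ring⟩
      rw [hz]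
      simp [PySem.List.slice_from (xs := F) (a := (0:Int)) le_rfl,
        PySem.List.slice_to (xs := F) (b := (0:Int)) le_rfl]
    · have hq1 : 0 < q.toNat := by omega
      have hqe : q = (q.toNat : Int) := by omega
      have hmod : PySem.Int.mod ((F.length : Int) - q) (F.length : Int) = (F.length : Int) - q := by
        rw [PySem.Int.mod_eq_emod_of_pos hmI]
        exact Int.emod_eq_of_lt (by omega) (by omega)
      rw [hmod, hqe]
      rw [PySem.List.slice_from_neg_natCast F q.toNat hq1,
        PySem.List.slice_to_neg_natCast F q.toNat hq1]
      congr 2 <;> omega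
  have hloc : (PySem.List.pyRange 0 (L.length : Int)).filter
      (fun i => PySem.List.pyGet? L i == some ' ')
      = ((List.range L.length).filter (fun i => L[i]? == some ' ')).map (fun (k : Nat) => (k : Int)) := by
    rw [PySem.List.pyRange_zero_natCast, List.filter_map]
    have hpred : ((fun i => PySem.List.pyGet? L i == some ' ') ∘ (fun k : Nat => (k : Int)))
        = (fun i => L[i]? == some ' ') := by
      funext i; simp [PySem.List.pyGet?_natCast]
    rw [hpred]
  have hfold : ∀ (r : List Char) (is : List Nat),
      (is.map (fun (k : Nat) => (k : Int))).foldl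
        (fun f i => PySem.List.slice f none (some i) ++ [' '] ++ PySem.List.slice f (some i) none) r
      = is.foldl (fun f i => f.take i ++ ' ' :: f.drop i) r := by
    intro r is
    induction is generalizing r with
    | nil => rfl
    | cons i is ih =>
      simp only [List.map_cons, List.foldl_cons]
      rw [PySem.List.slice_to (xs := r) (b := (i : Int)) (by positivity),
        PySem.List.slice_from (xs := r) (a := (i : Int)) (by positivity)]
      simp only [Int.toNat_natCast]
      rw [ih]
      simp
  rw [pv_replace_space L]
  rw [← hF, ← hq, hrot, hloc, hfold]
  set k := (PySem.Int.mod ((F.length : Int) - q) (F.length : Int)).toNat with hk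
  have hklen : (F.drop k ++ F.take k).length = F.length := by
    simp; omega
  rw [pv_fold_eq_merge L (F.drop k ++ F.take k) (by rw [hklen, hF])]
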